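-- pv_equiv track=rewrite | github.com/S0okJu/BOJ | 10000-19999/18000-18999/18800-18899/18869/18869.py | solution
-- ===== SOURCE A (Python) =====
-- from typing import List
-- from collections import defaultdict
--
-- def get_rank(planets:List[int]) -> tuple:
--     sorted_planets = sorted(set(planets))
--     rank_map = {v: i for i, v in enumerate(sorted_planets)}
--     return tuple(rank_map[v] for v in planets)
--
-- def solution(universe:List[List[int]]) -> int:
--     rank_count = defaultdict(int)
--
--     for planets in universe:
--         rank_tuple = get_rank(planets=planets)
--         rank_count[rank_tuple] +=1
--
--     count = 0
--     for freq in rank_count.values():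
--         if freq > 1:
--             count += freq * (freq-1) // 2 # nC2
--
--     return count
-- ===== SOURCE B (Python) =====
-- from typing import List
--
-- def get_rank(planets: List[int]) -> tuple:
--     sorted_planets = sorted(set(planets))
--     rank_map = {v: i for i, v in enumerate(sorted_planets)}
--     return tuple(rank_map[v] for v in planets)
--
-- def pair_count(sigs: List[tuple]) -> int:
--     # brute-force pairwise: matches of the head against the rest, plus pairs within the rest
--     if not sigs:
--         return 0
--     head, rest = sigs[0], sigs[1:]
--     return sum(1 for s in rest if s == head) + pair_count(rest)
--
-- def solution(universe: List[List[int]]) -> int: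
--     return pair_count([get_rank(p) for p in universe])
-- ===== Notes on version B (the rewrite author's own statement) =====
-- stated objective: alternative
-- what changed: Drops A's frequency dictionary and nC2 arithmetic entirely: B counts equal-signature pairs by direct pairwise comparison, recursing on the list (head's matches in the rest, plus pairs within the rest).
import Mathlib
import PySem

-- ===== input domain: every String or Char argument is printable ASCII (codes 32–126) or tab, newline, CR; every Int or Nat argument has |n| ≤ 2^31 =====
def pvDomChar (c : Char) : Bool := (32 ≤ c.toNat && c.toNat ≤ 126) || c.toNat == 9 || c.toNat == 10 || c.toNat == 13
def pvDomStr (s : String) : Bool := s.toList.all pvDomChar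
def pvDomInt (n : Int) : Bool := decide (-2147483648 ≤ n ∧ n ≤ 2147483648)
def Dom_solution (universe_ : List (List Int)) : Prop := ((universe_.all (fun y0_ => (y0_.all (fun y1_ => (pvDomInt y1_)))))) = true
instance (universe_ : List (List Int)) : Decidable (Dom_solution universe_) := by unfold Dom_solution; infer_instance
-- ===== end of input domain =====

-- B drops A's frequency dictionary and nC2 arithmetic: it counts equal-signature pairs by
-- direct pairwise comparison, recursing on the signature list (alternative decomposition).

-- ===== PORT A =====
-- get_rank: shared helper (both Python sources define it verbatim).
-- rank_map[v] never raises: every v of planets is a key; ported as get? … getD 0 (exact here).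
def getRank (planets : List Int) : List Int :=
  let sortedPlanets := PySem.List.sorted (PySem.Set.ofList planets) (fun x => x) false
  let rankMap : PySem.Dict Int Int :=
    (PySem.List.enumerate sortedPlanets).foldl (fun d p => d.insert p.2 p.1) PySem.Dict.empty
  planets.map (fun v => (rankMap.get? v).getD 0)

def solution (universe_ : List (List Int)) : Int :=
  let rankCount : PySem.Dict (List Int) Int :=
    universe_.foldl (fun d planets => d.modify (getRank planets) 0 (· + 1)) PySem.Dict.empty
  rankCount.values.foldl
    (fun count freq => if freq > 1 then count + PySem.Int.floordiv (freq * (freq - 1)) 2 else count) 0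

-- ===== PORT B =====
-- pair_count: head's matches in the rest (the generator sum), plus pairs within the rest.
def pairCount : List (List Int) → Int
  | [] => 0
  | head :: rest =>
      rest.foldl (fun a s => if s = head then a + 1 else a) 0 + pairCount rest

def solution_alt (universe_ : List (List Int)) : Int :=
  pairCount (universe_.map getRank)

-- ===== PRECONDITION & SPEC =====
def Spec_solution (universe_ : List (List Int)) (out : Int) : Prop := out = solution_alt universe_
instance (universe_ : List (List Int)) (out : Int) : Decidable (Spec_solution universe_ out) := by unfold Spec_solution; infer_instance

-- ===== CLAIM (what is proved, stated in full; the proofs are below) =====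
def Claim_equal_solution : Prop := ∀ (universe_ : List (List Int)), Dom_solution universe_ → Spec_solution universe_ (solution universe_)

-- ===== LEMMAS AND PROOFS =====

-- A's per-group contribution: nC2, with A's exact guard and floor division.
def c2 (f : Int) : Int := if f > 1 then PySem.Int.floordiv (f * (f - 1)) 2 else 0

theorem c2_natCast (m : Nat) : c2 (m : Int) = (m.choose 2 : Int) := by
  unfold c2
  match m with
  | 0 => simp
  | 1 => simp
  | (n+2) =>
    rw [if_pos (by push_cast; omega)]
    have h1 : ((n+2 : Nat) : Int) * (((n+2 : Nat) : Int) - 1) = (((n+2) * (n+1) : Nat) : Int) := by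
      push_cast; ring
    rw [h1, show (2:Int) = ((2:Nat):Int) from rfl, PySem.Int.floordiv_natCast]
    congr 1
    rw [Nat.choose_two_right]
    simp

theorem c2_succ (m : Nat) : c2 ((m : Int) + 1) = c2 (m : Int) + (m : Int) := by
  have h : ((m : Int) + 1) = ((m + 1 : Nat) : Int) := by push_cast; ring
  rw [h, c2_natCast, c2_natCast, Nat.choose_succ_succ, Nat.choose_one_right]
  push_cast; ring

-- replacing one value of a nodup list changes the sum by the pointwise difference
theorem sum_map_update {α : Type} [DecidableEq α] (s : List α) (x : α) (f g : α → Int)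
    (hx : x ∈ s) (hnd : s.Nodup)
    (hfg : ∀ k ∈ s, k ≠ x → f k = g k) :
    (s.map f).sum = (s.map g).sum + (f x - g x) := by
  induction s with
  | nil => cases hx
  | cons a t ih =>
    rw [List.nodup_cons] at hnd
    obtain ⟨hat, hndt⟩ := hnd
    rcases List.mem_cons.mp hx with rfl | hxt
    · have : t.map f = t.map g := by
        apply List.map_congr_left
        intro k hk
        exact hfg k (List.mem_cons_of_mem _ hk) (fun h => hat (h ▸ hk))
      simp [this]; ring
    · have hax : a ≠ x := fun h => hat (h ▸ hxt)
      have hfa : f a = g a := hfg a (List.mem_cons_self) hax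
      simp only [List.map_cons, List.sum_cons, hfa,
        ih hxt hndt (fun k hk hkx => hfg k (List.mem_cons_of_mem _ hk) hkx)]
      ring

-- the A-side total for a list of signatures
def aSum (sigs : List (List Int)) : Int :=
  ((PySem.Set.ofList sigs).map (fun k => c2 ((sigs.count k : Nat) : Int))).sum

theorem aSum_append (sigs : List (List Int)) (x : List Int) :
    aSum (sigs ++ [x]) = aSum sigs + (sigs.count x : Int) := by
  have hofl : PySem.Set.ofList (sigs ++ [x]) = PySem.Set.add (PySem.Set.ofList sigs) x := by
    rw [PySem.Set.ofList_eq_foldl, List.foldl_append, ← PySem.Set.ofList_eq_foldl]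
    rfl
  by_cases hx : x ∈ sigs
  · have hcontains : PySem.Set.add (PySem.Set.ofList sigs) x = PySem.Set.ofList sigs := by
      unfold PySem.Set.add
      rw [if_pos]
      rw [PySem.Set.contains_eq_decide]
      simpa [PySem.Set.mem_ofList] using hx
    have hxS : x ∈ PySem.Set.ofList sigs := (PySem.Set.mem_ofList _ _).mpr hx
    unfold aSum
    rw [hofl, hcontains]
    rw [sum_map_update (PySem.Set.ofList sigs) x
      (fun k => c2 (((sigs ++ [x]).count k : Nat) : Int))
      (fun k => c2 ((sigs.count k : Nat) : Int)) hxS (PySem.Set.nodup_ofList _)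
      (by
        intro k hk hkx
        have hc1 : List.count k [x] = 0 := List.count_eq_zero.mpr (by simp [hkx])
        have hc : (sigs ++ [x]).count k = sigs.count k := by
          rw [List.count_append, hc1]; omega
        simp only [hc])]
    have hcx : (sigs ++ [x]).count x = sigs.count x + 1 := by
      rw [List.count_append]; simp
    rw [hcx]
    push_cast
    rw [c2_succ]
    ring
  · have hnotc : PySem.Set.add (PySem.Set.ofList sigs) x = PySem.Set.ofList sigs ++ [x] := by
      unfold PySem.Set.add
      rw [if_neg]
      rw [PySem.Set.contains_eq_decide]
      simpa [PySem.Set.mem_ofList] using hx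
    have hc0 : sigs.count x = 0 := List.count_eq_zero.mpr hx
    unfold aSum
    rw [hofl, hnotc, List.map_append, List.sum_append]
    have hmap : (PySem.Set.ofList sigs).map (fun k => c2 (((sigs ++ [x]).count k : Nat) : Int))
        = (PySem.Set.ofList sigs).map (fun k => c2 ((sigs.count k : Nat) : Int)) := by
      apply List.map_congr_left
      intro k hk
      have hkx : k ≠ x := fun h => hx (h ▸ (PySem.Set.mem_ofList _ _).mp hk)
      have hc1 : List.count k [x] = 0 := List.count_eq_zero.mpr (by simp [hkx])
      have hc : (sigs ++ [x]).count k = sigs.count k := by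
        rw [List.count_append, hc1]; omega
      simp only [hc]
    rw [hmap]
    have : (sigs ++ [x]).count x = 1 := by
      rw [List.count_append, hc0]; simp
    simp [hc0, c2]

-- B's inner fold counts occurrences of head
theorem foldl_count_eq (l : List (List Int)) (h : List Int) (a : Int) :
    l.foldl (fun a s => if s = h then a + 1 else a) a = a + (l.count h : Int) := by
  induction l generalizing a with
  | nil => simp
  | cons s t ih =>
    simp only [List.foldl_cons, ih, List.count_cons]
    by_cases hs : s = h
    · subst hs; simp; omega
    · have hne : (h == s) = false := by
        simp; exact fun e => hs e.symm
      simp [hs]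

theorem pairCount_append_singleton (sigs : List (List Int)) (x : List Int) :
    pairCount (sigs ++ [x]) = pairCount sigs + (sigs.count x : Int) := by
  induction sigs with
  | nil => simp [pairCount]
  | cons h t ih =>
    simp only [List.cons_append, pairCount, ih, foldl_count_eq, List.count_append,
      List.count_cons]
    by_cases hxh : x = h
    · subst hxh; simp; omega
    · have h1 : (x == h) = false := by simp [hxh]
      have h2 : (h == x) = false := by simp; exact fun e => hxh e.symm
      simp [h1, h2]; omega

theorem pairCount_eq_aSum (sigs : List (List Int)) : pairCount sigs = aSum sigs := by
  induction sigs using List.reverseRecOn with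
  | nil => simp [pairCount, aSum, PySem.Set.ofList]
  | append_singleton sigs x ih =>
    rw [pairCount_append_singleton, aSum_append, ih]

theorem solution_eq_aSum (u : List (List Int)) :
    solution u = aSum (u.map getRank) := by
  unfold solution
  have h1 : u.foldl (fun d planets => d.modify (getRank planets) 0 (· + 1)) PySem.Dict.empty
      = PySem.Dict.counter (u.map getRank) := by
    rw [PySem.Dict.counter_eq_foldl, List.foldl_map]
  rw [h1]
  have h2 : ∀ (vals : List Int) (a : Int),
      vals.foldl (fun count freq => if freq > 1 then count + PySem.Int.floordiv (freq * (freq - 1)) 2 else count) a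
      = a + (vals.map c2).sum := by
    intro vals
    induction vals with
    | nil => simp
    | cons v t ih =>
      intro a
      simp only [List.foldl_cons, List.map_cons, List.sum_cons, ih]
      unfold c2
      split_ifs <;> ring
  rw [h2]
  have h3 : (PySem.Dict.counter (u.map getRank)).values
      = (PySem.Set.ofList (u.map getRank)).map (fun k => ((u.map getRank).count k : Int)) := by
    show ((PySem.Dict.counter (u.map getRank)).items.map (·.2)) = _
    rw [PySem.Dict.items_counter, List.map_map]
    rfl
  rw [h3, List.map_map]
  unfold aSum
  simp [Function.comp_def]

-- ===== VERDICT (by name: the statement is the Claim_ definition above) =====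
theorem solution_spec : Claim_equal_solution := by
  intro u _
  unfold Spec_solution solution_alt
  rw [solution_eq_aSum, pairCount_eq_aSum]
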